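-- pv_equiv track=rewrite | github.com/qiaoruiyang2023/Masonry_Wall_Builder | masonry_wall_builder_wild.py | is_pattern_valid
-- ===== SOURCE A (Python) =====
-- BRICK_HALF_LENGTH = 100       # Length of a half brick
--
-- HEAD_JOINT = 10               # Vertical joint size
--
-- def is_pattern_valid(pattern, previous_joints):
--     # Check if the pattern is valid against the constraints
--     current_joints = []
--     x = 0
--     for length in pattern[:-1]:  # Exclude the last brick to avoid extra head joint
--         x += length + HEAD_JOINT
--         current_joints.append(x)
--
--     # Constraint 1: No two head joints directly on top of each other
--     for cj in current_joints:
--         for pj in previous_joints: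
--             if abs(cj - pj) < 1e-6:
--                 return False  # Joint alignment too close
--
--     # Constraint 4: No two half bricks next to each other except at edges
--     for i in range(1, len(pattern) - 1):
--         if pattern[i] == BRICK_HALF_LENGTH and pattern[i - 1] == BRICK_HALF_LENGTH:
--             return False
--
--     return True
-- ===== SOURCE B (Python) =====
-- def is_pattern_valid(pattern, previous_joints):
--     # Single fused pass over pattern[:-1]: running joint position checked against a
--     # hash set of previous joints, and the half-brick adjacency checked against the
--     # previous element, with early exit.
--     forbidden = set(previous_joints)
--     x = 0
--     prev_len = None
--     for length in pattern[:-1]: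
--         x += length + 10
--         if x in forbidden:
--             return False
--         if length == 100 and prev_len == 100:
--             return False
--         prev_len = length
--     return True
-- ===== Notes on version B (the rewrite author's own statement) =====
-- stated objective: alternative
-- what changed: A's three separate loops (build the joint list, nested all-pairs scan against previous_joints, then an index loop over pattern for adjacent half bricks) are replaced by one fused pass over pattern[:-1] that checks the running joint position against a pre-built hash set and the half-brick rule against the previously seen element, with early exit.
import Mathlib
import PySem

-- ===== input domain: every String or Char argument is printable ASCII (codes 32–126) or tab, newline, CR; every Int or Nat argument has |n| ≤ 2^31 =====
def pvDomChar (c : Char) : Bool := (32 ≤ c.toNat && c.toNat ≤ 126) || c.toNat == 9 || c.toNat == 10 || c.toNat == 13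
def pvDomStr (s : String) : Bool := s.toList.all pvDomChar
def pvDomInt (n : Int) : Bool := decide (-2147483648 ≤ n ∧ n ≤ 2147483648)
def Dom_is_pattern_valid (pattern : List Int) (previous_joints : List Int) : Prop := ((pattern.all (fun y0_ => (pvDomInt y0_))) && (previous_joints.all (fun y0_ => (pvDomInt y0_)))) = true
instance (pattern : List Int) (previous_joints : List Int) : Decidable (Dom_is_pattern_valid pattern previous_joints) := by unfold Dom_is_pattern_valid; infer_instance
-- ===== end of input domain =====

-- B replaces A's three loops (prefix-sum build, nested all-pairs joint scan, index loop)
-- by ONE fused pass over pattern[:-1] with a hash set of previous joints and early exit.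


-- ===== PORT A =====
-- abs(cj - pj) < 1e-6 on two Python ints is exact: it holds iff cj = pj (an integer
-- difference has absolute value 0 or ≥ 1), so it is ported as cj == pj.
def is_pattern_valid (pattern : List Int) (previous_joints : List Int) : Bool :=
  let current_joints :=
    ((PySem.List.slice pattern none (some (-1))).foldl
      (fun (st : Int × List Int) length =>
        (st.1 + (length + 10), st.2 ++ [st.1 + (length + 10)])) (0, [])).2
  if current_joints.any (fun cj => previous_joints.any (fun pj => cj == pj)) then
    false
  else if (PySem.List.pyRange 1 ((pattern.length : Int) - 1) 1).any
      (fun i => PySem.List.pyGetD pattern i 0 == 100 &&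
                PySem.List.pyGetD pattern (i - 1) 0 == 100) then
    false
  else
    true

-- ===== PORT B =====
def altGo (forbidden : PySem.Set Int) : List Int → Int → Option Int → Bool
  | [], _, _ => true
  | length :: rest, x, prev_len =>
    let x' := x + (length + 10)
    if forbidden.contains x' then false
    else if length == 100 && prev_len == some 100 then false
    else altGo forbidden rest x' (some length)

def is_pattern_valid_alt (pattern : List Int) (previous_joints : List Int) : Bool :=
  altGo (PySem.Set.ofList previous_joints)
    (PySem.List.slice pattern none (some (-1))) 0 none

-- ===== PRECONDITION & SPEC =====
def Spec_is_pattern_valid (pattern : List Int) (previous_joints : List Int) (out : Bool) : Prop := out = is_pattern_valid_alt pattern previous_joints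
instance (pattern : List Int) (previous_joints : List Int) (out : Bool) : Decidable (Spec_is_pattern_valid pattern previous_joints out) := by unfold Spec_is_pattern_valid; infer_instance

-- ===== CLAIM (what is proved, stated in full; the proofs are below) =====
def Claim_equal_is_pattern_valid : Prop := ∀ (pattern : List Int) (previous_joints : List Int), Dom_is_pattern_valid pattern previous_joints → Spec_is_pattern_valid pattern previous_joints (is_pattern_valid pattern previous_joints)

-- ===== LEMMAS AND PROOFS =====

/-- The joint positions A accumulates, as a direct recursion. -/
def jointsOf : List Int → Int → List Int
  | [], _ => []
  | a :: t, x => (x + (a + 10)) :: jointsOf t (x + (a + 10))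

lemma foldl_joints (s : List Int) (x : Int) (acc : List Int) :
    ((s.foldl (fun (st : Int × List Int) length =>
        (st.1 + (length + 10), st.2 ++ [st.1 + (length + 10)])) (x, acc)).2
      = acc ++ jointsOf s x) := by
  induction s generalizing x acc with
  | nil => simp [jointsOf]
  | cons a t ih => simp [jointsOf, List.foldl_cons, ih, List.append_assoc]

/-- A's half-brick scan, as a recursion on consecutive pairs. -/
def pairBad : List Int → Bool
  | a :: b :: t => (b == 100 && a == 100) || pairBad (b :: t)
  | _ => false

/-- The adjacency state B threads (previous element as an Option). -/
def adjBad : Option Int → List Int → Bool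
  | _, [] => false
  | prev, a :: t => (a == 100 && prev == some 100) || adjBad (some a) t

lemma adjBad_none (l : List Int) : adjBad none l = pairBad l := by
  match l with
  | [] => rfl
  | [a] => simp [adjBad, pairBad]
  | a :: b :: t =>
    have ih : adjBad none (b :: t) = pairBad (b :: t) := adjBad_none (b :: t)
    simp only [adjBad, pairBad] at *
    cases hb : (b == 100) <;> cases ha : (a == 100) <;>
      simp_all

/-- pairBad as an index scan with getD. -/
lemma pairBad_eq_range (l : List Int) :
    pairBad l = (List.range (l.length - 1)).any
      (fun k => (l.getD (k + 1) 0 == 100) && (l.getD k 0 == 100)) := by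
  match l with
  | [] => rfl
  | [a] => rfl
  | a :: b :: t =>
    have ih := pairBad_eq_range (b :: t)
    simp only [List.length_cons, Nat.add_sub_cancel] at ih ⊢
    rw [List.range_succ_eq_map]
    simp only [List.any_cons, List.any_map]
    have hshift : ((fun k => ((a :: b :: t).getD (k + 1) 0 == 100) &&
          ((a :: b :: t).getD k 0 == 100)) ∘ Nat.succ)
        = (fun k => ((b :: t).getD (k + 1) 0 == 100) && ((b :: t).getD k 0 == 100)) := by
      funext k
      simp [Function.comp, Nat.succ_eq_add_one]
    rw [hshift, ← ih]
    simp [pairBad, List.getD]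

/-- The core invariant: B's fused loop computes the conjunction of A's two checks. -/
lemma altGo_spec (F : PySem.Set Int) (s : List Int) (x : Int) (prev : Option Int) :
    altGo F s x prev
      = (!(jointsOf s x).any (fun c => F.contains c) && !(adjBad prev s)) := by
  induction s generalizing x prev with
  | nil => simp [altGo, jointsOf, adjBad]
  | cons a t ih =>
    simp only [altGo, jointsOf, adjBad, List.any_cons]
    cases hc : F.contains (x + (a + 10)) with
    | true => simp
    | false =>
      cases hh : (a == 100 && prev == some 100) with
      | true => simp
      | false => simp [ih]

lemma contains_ofList (xs : List Int) (c : Int) :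
    PySem.Set.contains (PySem.Set.ofList xs) c = xs.any (fun pj => c == pj) := by
  apply Bool.eq_iff_iff.mpr
  rw [PySem.Set.contains_iff, PySem.Set.mem_ofList, List.any_eq_true]
  constructor
  · intro h; exact ⟨c, h, by simp⟩
  · rintro ⟨y, hy, he⟩
    have : c = y := by simpa using he
    exact this ▸ hy

-- ===== VERDICT (by name: the statement is the Claim_ definition above) =====
lemma getD_pair_dropLast (pattern : List Int) (k : Nat) (hk : k < pattern.length - 2) :
    ((PySem.List.pyGetD pattern (1 + (k : Int)) 0 == 100) &&
     (PySem.List.pyGetD pattern (1 + (k : Int) - 1) 0 == 100))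
    = ((pattern.dropLast.getD (k + 1) 0 == 100) && (pattern.dropLast.getD k 0 == 100)) := by
  have h1 : (1 : Int) + (k : Int) = ((k + 1 : Nat) : Int) := by push_cast; ring
  rw [h1]
  rw [show ((k + 1 : Nat) : Int) - 1 = ((k : Nat) : Int) from by push_cast; ring]
  rw [PySem.List.pyGetD_natCast, PySem.List.pyGetD_natCast]
  have hk1 : k + 1 < pattern.length := by omega
  have hk0 : k < pattern.length := by omega
  have hk1' : k + 1 < pattern.dropLast.length := by rw [List.length_dropLast]; omega
  have hk0' : k < pattern.dropLast.length := by rw [List.length_dropLast]; omega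
  rw [List.getD_eq_getElem pattern 0 hk1, List.getD_eq_getElem pattern 0 hk0,
      List.getD_eq_getElem _ 0 hk1', List.getD_eq_getElem _ 0 hk0']
  simp [List.getElem_dropLast]

theorem is_pattern_valid_spec : Claim_equal_is_pattern_valid := by
  intro pattern previous_joints _
  unfold Spec_is_pattern_valid is_pattern_valid is_pattern_valid_alt
  rw [PySem.List.slice_to_neg_one]
  rw [altGo_spec, adjBad_none]
  have hfold := foldl_joints pattern.dropLast 0 []
  simp only [List.nil_append] at hfold
  -- the joint check agrees pointwise
  have hfun : (fun c => PySem.Set.contains (PySem.Set.ofList previous_joints) c)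
      = (fun cj => previous_joints.any (fun pj => cj == pj)) :=
    funext (fun c => contains_ofList previous_joints c)
  -- the adjacency check: A's pyRange scan equals pairBad on dropLast
  have hadj : (PySem.List.pyRange 1 ((pattern.length : Int) - 1) 1).any
      (fun i => PySem.List.pyGetD pattern i 0 == 100 &&
                PySem.List.pyGetD pattern (i - 1) 0 == 100)
      = pairBad pattern.dropLast := by
    rw [PySem.List.pyRange_one, pairBad_eq_range]
    have hlen : ((pattern.length : Int) - 1 - 1).toNat = pattern.length - 2 := by omega
    have hlen2 : pattern.dropLast.length - 1 = pattern.length - 2 := by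
      rw [List.length_dropLast]; omega
    rw [hlen, hlen2, List.any_map]
    apply Bool.eq_iff_iff.mpr
    simp only [List.any_eq_true, List.mem_range, Function.comp]
    constructor
    · rintro ⟨k, hk, h⟩
      exact ⟨k, hk, by rw [← getD_pair_dropLast pattern k hk]; exact h⟩
    · rintro ⟨k, hk, h⟩
      exact ⟨k, hk, by rw [getD_pair_dropLast pattern k hk]; exact h⟩
  simp only [hfold, hfun, hadj]
  cases hJ : (jointsOf pattern.dropLast 0).any
      (fun cj => previous_joints.any (fun pj => cj == pj)) <;>
    cases hA : pairBad pattern.dropLast <;> simp
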